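-- pv_equiv track=rewrite | github.com/meantux/gugusse16mm | stabilize.py | edgeOf
-- ===== SOURCE A (Python) =====
-- def square(x):
--     return x*x
--
-- def edgeOf(line, direction):
--     checkwidth=int(len(line)/6)
--     lowest=(0,0.0)
--     highest=(0,0.0)
--     #trace=[]
--     for idx in range(checkwidth, len(line)-checkwidth):
--         delta=0
--         for i in range(1, checkwidth):
--             diff=(square(line[idx-i]) - square(line[idx+i]))
--             delta+=diff
--         #trace.append((idx,delta))
--         if(delta<lowest[1]):
--             lowest=(idx, delta)
--         if(delta>highest[1]):
--             highest=(idx, delta)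
--     #print (str(trace))
--     if direction == "darkToLight":
--         return lowest[0]
--     if direction == "lightToDark":
--         return highest[0]
-- ===== SOURCE B (Python) =====
-- def edgeOf(line, direction):
--     # prefix sums of squares give each windowed delta in O(1); direction is
--     # resolved up front into a sign so a single min-scan over a staged
--     # candidate list replaces A's two extremum trackers and O(n) inner loop.
--     if direction == "darkToLight":
--         sign = 1
--     elif direction == "lightToDark":
--         sign = -1
--     else:
--         return None
--     n = len(line)
--     cw = n // 6
--     P = [0]
--     for x in line:
--         P.append(P[-1] + x * x)
--     cands = [(i, sign * ((P[i] - P[i - cw + 1]) - (P[i + cw] - P[i + 1])))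
--              for i in range(cw, n - cw)]
--     best = (0, 0)
--     for c in cands:
--         if c[1] < best[1]:
--             best = c
--     return best[0]
-- ===== Notes on version B (the rewrite author's own statement) =====
-- stated objective: faster
-- what changed: B builds a prefix-sum array of squares once so each windowed delta costs O(1), resolves the direction into a sign up front, stages the (index, signed-delta) candidates as a list and finds the answer with a single min-scan, instead of A's O(n) inner difference loop per index and two simultaneous extremum trackers.
import Mathlib
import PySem

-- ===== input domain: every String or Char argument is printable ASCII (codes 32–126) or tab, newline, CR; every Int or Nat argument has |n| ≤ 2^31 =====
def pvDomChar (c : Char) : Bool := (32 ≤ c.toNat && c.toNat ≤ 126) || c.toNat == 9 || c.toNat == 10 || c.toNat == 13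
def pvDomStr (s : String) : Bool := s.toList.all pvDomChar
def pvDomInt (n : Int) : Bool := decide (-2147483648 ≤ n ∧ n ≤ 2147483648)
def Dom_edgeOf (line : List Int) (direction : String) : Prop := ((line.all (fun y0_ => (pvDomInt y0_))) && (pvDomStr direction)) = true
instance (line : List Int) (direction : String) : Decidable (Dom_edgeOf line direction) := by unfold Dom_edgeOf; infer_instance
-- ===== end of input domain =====

-- B replaces A's O(n) inner loop by prefix sums of squares, folds the direction into a sign
-- up front, and does one min-scan over a staged candidate list instead of two trackers.

-- ===== PORT A =====
def square (x : Int) : Int := x * x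

-- int(len(line)/6) = len(line) // 6 exactly (len is nonnegative and far below 2^52, where
-- float division is exact enough for truncation = floor).
-- line[idx-i] / line[idx+i] are always in range for the indices A generates, so pyGetD _ 0 is exact.
def edgeOf (line : List Int) (direction : String) : Option Int :=
  let checkwidth : Int := PySem.Int.floordiv (line.length : Int) 6
  let st :=
    (PySem.List.pyRange checkwidth ((line.length : Int) - checkwidth) 1).foldl
      (fun (st : (Int × Int) × (Int × Int)) idx =>
        let delta :=
          (PySem.List.pyRange 1 checkwidth 1).foldl
            (fun d i =>
              d + (square (PySem.List.pyGetD line (idx - i) 0)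
                   - square (PySem.List.pyGetD line (idx + i) 0))) 0
        let st1 := if delta < st.1.2 then ((idx, delta), st.2) else st
        if delta > st1.2.2 then (st1.1, (idx, delta)) else st1)
      (((0 : Int), (0 : Int)), ((0 : Int), (0 : Int)))
  if direction == "darkToLight" then some st.1.1
  else if direction == "lightToDark" then some st.2.1
  else none

-- ===== PORT B =====
-- prefix sums of squares: P = [0]; for x in line: P.append(P[-1] + x*x)
def prefixSq (s : Int) : List Int → List Int
  | [] => [s]
  | x :: xs => s :: prefixSq (s + x * x) xs

def edgeOf_alt (line : List Int) (direction : String) : Option Int :=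
  let sign? : Option Int :=
    if direction == "darkToLight" then some 1
    else if direction == "lightToDark" then some (-1)
    else none
  match sign? with
  | none => none
  | some sign =>
    let n : Int := (line.length : Int)
    let cw : Int := PySem.Int.floordiv n 6
    let P := prefixSq 0 line
    let cands :=
      (PySem.List.pyRange cw (n - cw) 1).map
        (fun i => (i, sign * ((PySem.List.pyGetD P i 0 - PySem.List.pyGetD P (i - cw + 1) 0)
                    - (PySem.List.pyGetD P (i + cw) 0 - PySem.List.pyGetD P (i + 1) 0))))
    let best := cands.foldl (fun (b : Int × Int) c => if c.2 < b.2 then c else b) ((0 : Int), (0 : Int))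
    some best.1

-- ===== PRECONDITION & SPEC =====
def Spec_edgeOf (line : List Int) (direction : String) (out : Option Int) : Prop := out = edgeOf_alt line direction
instance (line : List Int) (direction : String) (out : Option Int) : Decidable (Spec_edgeOf line direction out) := by unfold Spec_edgeOf; infer_instance

-- ===== CLAIM =====
def Claim_equal_edgeOf : Prop := ∀ (line : List Int) (direction : String), Dom_edgeOf line direction → Spec_edgeOf line direction (edgeOf line direction)

-- ===== LEMMAS AND PROOFS =====

theorem prefixSq_getD_zero (s : Int) (xs : List Int) : (prefixSq s xs).getD 0 0 = s := by
  cases xs <;> rfl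

theorem prefixSq_step (xs : List Int) (s : Int) (k : Nat) (hk : k < xs.length) :
    (prefixSq s xs).getD (k + 1) 0 = (prefixSq s xs).getD k 0 + (xs.getD k 0) * (xs.getD k 0) := by
  induction xs generalizing s k with
  | nil => simp at hk
  | cons x xs ih =>
    cases k with
    | zero =>
      simp only [prefixSq, List.getD_cons_succ, List.getD_cons_zero, Nat.zero_add]
      exact prefixSq_getD_zero (s + x * x) xs
    | succ k => simpa [prefixSq] using ih (s + x * x) k (by simpa using hk)

theorem prefixSq_pystep (line : List Int) (j : Int) (h0 : 0 ≤ j) (hj : j < (line.length : Int)) :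
    PySem.List.pyGetD (prefixSq 0 line) (j + 1) 0 - PySem.List.pyGetD (prefixSq 0 line) j 0
      = PySem.List.pyGetD line j 0 * PySem.List.pyGetD line j 0 := by
  obtain ⟨k, rfl⟩ := Int.eq_ofNat_of_zero_le h0
  have hk : k < line.length := by exact_mod_cast hj
  rw [show ((k : Int) + 1) = ((k + 1 : Nat) : Int) by push_cast; ring]
  rw [PySem.List.pyGetD_natCast, PySem.List.pyGetD_natCast, PySem.List.pyGetD_natCast]
  rw [prefixSq_step line 0 k hk]; ring

-- A's inner loop for one idx equals the prefix-sum delta.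
theorem delta_eq (line : List Int) (idx : Int) (c : Nat)
    (h1 : (c : Int) ≤ idx) (h2 : idx + (c : Int) ≤ (line.length : Int)) :
    (PySem.List.pyRange 1 (c : Int) 1).foldl
      (fun d i =>
        d + (square (PySem.List.pyGetD line (idx - i) 0)
             - square (PySem.List.pyGetD line (idx + i) 0))) 0
    = (PySem.List.pyGetD (prefixSq 0 line) idx 0
        - PySem.List.pyGetD (prefixSq 0 line) (idx - (c : Int) + 1) 0)
      - (PySem.List.pyGetD (prefixSq 0 line) (idx + (c : Int)) 0
        - PySem.List.pyGetD (prefixSq 0 line) (idx + 1) 0) := by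
  induction c with
  | zero =>
    rw [PySem.List.pyRange_one_eq_nil (by norm_num)]
    simp
  | succ c ih =>
    rcases Nat.eq_zero_or_pos c with hc | hc
    · subst hc
      rw [PySem.List.pyRange_one_eq_nil (by norm_num)]
      have : idx - (1 : Int) + 1 = idx := by ring
      simp [this]
    · have hcc : (1 : Int) ≤ (c : Int) := by exact_mod_cast hc
      have hsplit : PySem.List.pyRange 1 ((c : Int) + 1) 1
          = PySem.List.pyRange 1 (c : Int) 1 ++ [(c : Int)] :=
        PySem.List.pyRange_one_succ_right (by linarith)
      push_cast
      rw [hsplit, List.foldl_append]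
      rw [ih (by push_cast at h1 ⊢; linarith) (by push_cast at h2 ⊢; linarith)]
      have e1 := prefixSq_pystep line (idx - (c : Int)) (by push_cast at h1; linarith) (by push_cast at h2; linarith)
      have e2 := prefixSq_pystep line (idx + (c : Int)) (by push_cast at h1; linarith) (by push_cast at h2; linarith)
      have a1 : idx - (c : Int) + 1 = idx - ((c : Int) + 1) + 1 + 1 := by ring
      have a2 : idx + ((c : Int) + 1) = idx + (c : Int) + 1 := by ring
      simp only [List.foldl_cons, List.foldl_nil, square]
      rw [a1, a2]
      have e1' : PySem.List.pyGetD (prefixSq 0 line) (idx - ((c:Int)+1) + 1 + 1) 0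
          - PySem.List.pyGetD (prefixSq 0 line) (idx - ((c:Int)+1) + 1) 0
          = PySem.List.pyGetD line (idx - (c:Int)) 0 * PySem.List.pyGetD line (idx - (c:Int)) 0 := by
        have b1 : idx - ((c:Int)+1) + 1 + 1 = (idx - (c:Int)) + 1 := by ring
        have b2 : idx - ((c:Int)+1) + 1 = idx - (c:Int) := by ring
        rw [b1, b2]; exact e1
      linarith [e1, e2, e1']

-- A's double-tracker fold splits into two independent single-tracker folds.
theorem fold_split (g : Int → Int) (L : List Int) (lo hi : Int × Int) :
    L.foldl
      (fun (st : (Int × Int) × (Int × Int)) idx =>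
        let delta := g idx
        let st1 := if delta < st.1.2 then ((idx, delta), st.2) else st
        if delta > st1.2.2 then (st1.1, (idx, delta)) else st1)
      (lo, hi)
    = (L.foldl (fun (p : Int × Int) idx => if g idx < p.2 then (idx, g idx) else p) lo,
       L.foldl (fun (p : Int × Int) idx => if g idx > p.2 then (idx, g idx) else p) hi) := by
  induction L generalizing lo hi with
  | nil => rfl
  | cons x L ih =>
    simp only [List.foldl_cons]
    rw [← ih]
    congr 1
    by_cases h1 : g x < lo.2 <;> by_cases h2 : g x > hi.2 <;> simp [h1, h2]

-- The max-tracker with > equals a negated min-tracker with <.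
theorem fold_neg (g : Int → Int) (L : List Int) (p : Int × Int) :
    L.foldl (fun (p : Int × Int) idx => if g idx > p.2 then (idx, g idx) else p) p
    = (let r := L.foldl (fun (q : Int × Int) idx => if -g idx < q.2 then (idx, -g idx) else q) (p.1, -p.2)
       (r.1, -r.2)) := by
  induction L generalizing p with
  | nil => simp
  | cons x L ih =>
    simp only [List.foldl_cons]
    by_cases h : g x > p.2
    · have h' : -g x < -p.2 := by omega
      rw [if_pos h, if_pos h', ih (x, g x)]
    · have h' : ¬ (-g x < -p.2) := by omega
      rw [if_neg h, if_neg h', ih p]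

theorem edgeOf_spec_aux (line : List Int) (direction : String) :
    edgeOf line direction = edgeOf_alt line direction := by
  simp only [edgeOf, edgeOf_alt]
  set n : Int := (line.length : Int) with hn
  set cw : Int := PySem.Int.floordiv n 6 with hcw
  have hcw0 : 0 ≤ cw := by
    rw [hcw, PySem.Int.floordiv_eq_ediv_of_pos (by norm_num)]
    exact Int.ediv_nonneg (by positivity) (by norm_num)
  obtain ⟨c, hc⟩ := Int.eq_ofNat_of_zero_le hcw0
  -- name the two delta functions
  set gA : Int → Int := fun idx =>
    (PySem.List.pyRange 1 cw 1).foldl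
      (fun d i =>
        d + (square (PySem.List.pyGetD line (idx - i) 0)
             - square (PySem.List.pyGetD line (idx + i) 0))) 0 with hgA
  set gB : Int → Int := fun i =>
    (PySem.List.pyGetD (prefixSq 0 line) i 0
      - PySem.List.pyGetD (prefixSq 0 line) (i - cw + 1) 0)
    - (PySem.List.pyGetD (prefixSq 0 line) (i + cw) 0
      - PySem.List.pyGetD (prefixSq 0 line) (i + 1) 0) with hgB
  have hg : ∀ idx ∈ PySem.List.pyRange cw (n - cw) 1, gA idx = gB idx := by
    intro idx hmem
    rw [PySem.List.mem_pyRange_one] at hmem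
    rw [hgA, hgB]
    simp only
    rw [hc]
    exact delta_eq line idx c (by rw [← hc]; exact hmem.1)
      (by rw [← hc, ← hn]; linarith [hmem.2])
  -- rewrite A's fold to use gB
  have hA :
      (PySem.List.pyRange cw (n - cw) 1).foldl
        (fun (st : (Int × Int) × (Int × Int)) idx =>
          let delta := gA idx
          let st1 := if delta < st.1.2 then ((idx, delta), st.2) else st
          if delta > st1.2.2 then (st1.1, (idx, delta)) else st1)
        (((0 : Int), (0 : Int)), ((0 : Int), (0 : Int)))
      =
      (PySem.List.pyRange cw (n - cw) 1).foldl
        (fun (st : (Int × Int) × (Int × Int)) idx =>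
          let delta := gB idx
          let st1 := if delta < st.1.2 then ((idx, delta), st.2) else st
          if delta > st1.2.2 then (st1.1, (idx, delta)) else st1)
        (((0 : Int), (0 : Int)), ((0 : Int), (0 : Int))) := by
    apply PySem.List.foldl_congr_mem
    intro acc idx hmem
    simp only [hg idx hmem]
  by_cases h1 : direction = "darkToLight"
  · -- B's fold over mapped candidates = min-tracker over indices with gB
    simp only [h1, beq_self_eq_true, if_true]
    rw [hA, fold_split gB]
    simp only [List.foldl_map, one_mul]
    rfl
  · by_cases h2 : direction = "lightToDark"
    · simp only [h2, beq_self_eq_true, if_true, beq_iff_eq, if_false,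
        String.reduceEq]
      rw [hA, fold_split gB]
      simp only [List.foldl_map, neg_one_mul]
      rw [fold_neg gB]
      simp only [neg_zero]
      rfl
    · simp [h1, h2]

-- ===== VERDICT =====
theorem edgeOf_spec : Claim_equal_edgeOf := by
  intro line direction _
  unfold Spec_edgeOf
  exact edgeOf_spec_aux line direction
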